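-- pv_equiv track=rewrite | github.com/przemek83/data-explorer-python | data_explorer/operation.py | __sum_entries
-- ===== SOURCE A (Python) =====
-- from typing import Dict, Tuple
--
-- def __sum_entries(aggregation_data, grouping_data) -> Dict[str, Tuple[int, int]]:
--     results: Dict[str, Tuple[int, int]] = {}
--     for index, grouping in enumerate(grouping_data):
--         if grouping in results:
--             current_values = results[grouping]
--             results[grouping] = (current_values[0] + 1, current_values[1] + aggregation_data[index])
--         else:
--             results[grouping] = (1, aggregation_data[index])
--     return results
-- ===== SOURCE B (Python) =====
-- def __sum_entries(aggregation_data, grouping_data):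
--     buckets = {}
--     for index, grouping in enumerate(grouping_data):
--         buckets.setdefault(grouping, []).append(aggregation_data[index])
--     return {grouping: (len(values), sum(values))
--             for grouping, values in buckets.items()}
-- ===== Notes on version B (the rewrite author's own statement) =====
-- stated objective: alternative
-- what changed: B splits the work into a collect phase that buckets all aggregation values per group in a dict of lists, then a comprehension computing (count, sum) per bucket, instead of A's single pass with running (count, sum) accumulators and a membership branch.
import Mathlib
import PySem

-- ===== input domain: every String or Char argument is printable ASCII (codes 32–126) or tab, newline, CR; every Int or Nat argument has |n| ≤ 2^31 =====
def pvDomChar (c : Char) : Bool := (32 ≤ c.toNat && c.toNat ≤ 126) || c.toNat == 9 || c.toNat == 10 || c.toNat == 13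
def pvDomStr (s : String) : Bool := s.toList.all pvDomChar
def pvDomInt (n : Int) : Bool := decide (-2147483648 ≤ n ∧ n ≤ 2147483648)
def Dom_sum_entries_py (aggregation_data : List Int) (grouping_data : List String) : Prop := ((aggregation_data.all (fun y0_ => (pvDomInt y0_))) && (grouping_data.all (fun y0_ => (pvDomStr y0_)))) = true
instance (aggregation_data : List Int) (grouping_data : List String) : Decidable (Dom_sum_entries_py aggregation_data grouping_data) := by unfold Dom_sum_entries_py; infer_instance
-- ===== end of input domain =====

-- B collects per-group value lists first and aggregates (count, sum) in a second pass,
-- instead of A's single pass with running (count, sum) accumulators: an alternative decomposition.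


-- ===== PORT A =====
def sum_entries_py (aggregation_data : List Int) (grouping_data : List String) : List (String × Int × Int) :=
  ((PySem.List.enumerate grouping_data).foldl
    (fun (results : PySem.Dict String (Int × Int)) p =>
      if results.contains p.2 then
        let current_values := results.getD p.2 (0, 0)
        results.insert p.2 (current_values.1 + 1,
          current_values.2 + PySem.List.pyGetD aggregation_data p.1 0)
      else
        results.insert p.2 (1, PySem.List.pyGetD aggregation_data p.1 0))
    PySem.Dict.empty).items

-- ===== PORT B =====
def sum_entries_py_alt (aggregation_data : List Int) (grouping_data : List String) : List (String × Int × Int) :=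
  let buckets : PySem.Dict String (List Int) :=
    (PySem.List.enumerate grouping_data).foldl
      (fun buckets p =>
        buckets.modify p.2 [] (fun vs => vs ++ [PySem.List.pyGetD aggregation_data p.1 0]))
      PySem.Dict.empty
  buckets.items.map (fun q => (q.1, ((q.2.length : Int), q.2.foldl (· + ·) 0)))

-- ===== PRECONDITION & SPEC =====
-- Pre_ excludes exactly the inputs where grouping_data is longer than aggregation_data,
-- on which A (and B) raises IndexError at aggregation_data[index].
def Pre_sum_entries_py (aggregation_data : List Int) (grouping_data : List String) : Prop :=
  grouping_data.length ≤ aggregation_data.length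
instance (aggregation_data : List Int) (grouping_data : List String) : Decidable (Pre_sum_entries_py aggregation_data grouping_data) := by unfold Pre_sum_entries_py; infer_instance
def pvWitness_sum_entries_py : List Int × List String := ([1, 2, 3], ["a", "b", "a"])

def Spec_sum_entries_py (aggregation_data : List Int) (grouping_data : List String) (out : List (String × Int × Int)) : Prop := out = sum_entries_py_alt aggregation_data grouping_data
instance (aggregation_data : List Int) (grouping_data : List String) (out : List (String × Int × Int)) : Decidable (Spec_sum_entries_py aggregation_data grouping_data out) := by unfold Spec_sum_entries_py; infer_instance

-- ===== CLAIM (what is proved, stated in full; the proofs are below) =====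
def Claim_equal_sum_entries_py : Prop := ∀ (aggregation_data : List Int) (grouping_data : List String), Dom_sum_entries_py aggregation_data grouping_data → Pre_sum_entries_py aggregation_data grouping_data → Spec_sum_entries_py aggregation_data grouping_data (sum_entries_py aggregation_data grouping_data)

-- ===== LEMMAS AND PROOFS =====

-- A's loop body, collapsed: both branches insert (old count + 1, old sum + value).
def pvStepA (d : PySem.Dict String (Int × Int)) (q : String × Int) : PySem.Dict String (Int × Int) :=
  d.insert q.1 ((d.getD q.1 (0, 0)).1 + 1, (d.getD q.1 (0, 0)).2 + q.2)

-- B's loop body over (group, value) pairs.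
def pvStepB (d : PySem.Dict String (List Int)) (q : String × Int) : PySem.Dict String (List Int) :=
  d.modify q.1 [] (fun vs => vs ++ [q.2])

lemma pvStepA_collapse (d : PySem.Dict String (Int × Int)) (q : String × Int) :
    (if d.contains q.1 then
      let current_values := d.getD q.1 (0, 0)
      d.insert q.1 (current_values.1 + 1, current_values.2 + q.2)
    else d.insert q.1 (1, q.2)) = pvStepA d q := by
  unfold pvStepA
  by_cases h : d.contains q.1 = true
  · simp [h]
  · simp [eq_false_of_ne_true h, PySem.Dict.getD_of_not_contains d (0, 0) (eq_false_of_ne_true h)]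

lemma pvGetD_foldA : ∀ (l : List (String × Int)) (d : PySem.Dict String (Int × Int)) (g : String),
    (l.foldl pvStepA d).getD g (0, 0)
      = ((d.getD g (0, 0)).1 + ((l.filter (fun q => q.1 == g)).length : Int),
         (d.getD g (0, 0)).2 + ((l.filter (fun q => q.1 == g)).map (·.2)).sum)
  | [], d, g => by simp
  | a :: l, d, g => by
    rw [List.foldl_cons, pvGetD_foldA l (pvStepA d a) g]
    by_cases h : a.1 = g
    · subst h
      simp [pvStepA]
      constructor
      · ring
      · ring
    · simp [pvStepA, PySem.Dict.getD_insert, Ne.symm h, h]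

theorem sum_entries_py_spec : Claim_equal_sum_entries_py := by
  intro agg grp _ _
  unfold Spec_sum_entries_py sum_entries_py sum_entries_py_alt
  -- rewrite both loops over enumerate as loops over (group, value) pairs
  set l : List (String × Int) :=
    (PySem.List.enumerate grp).map (fun p => (p.2, PySem.List.pyGetD agg p.1 0)) with hl
  have hA : (PySem.List.enumerate grp).foldl
      (fun (results : PySem.Dict String (Int × Int)) p =>
        if results.contains p.2 then
          let current_values := results.getD p.2 (0, 0)
          results.insert p.2 (current_values.1 + 1,
            current_values.2 + PySem.List.pyGetD agg p.1 0)
        else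
          results.insert p.2 (1, PySem.List.pyGetD agg p.1 0))
      PySem.Dict.empty = l.foldl pvStepA PySem.Dict.empty := by
    rw [hl, List.foldl_map]
    congr 1
    funext d p
    exact pvStepA_collapse d (p.2, PySem.List.pyGetD agg p.1 0)
  have hB : (PySem.List.enumerate grp).foldl
      (fun (buckets : PySem.Dict String (List Int)) p =>
        buckets.modify p.2 [] (fun vs => vs ++ [PySem.List.pyGetD agg p.1 0]))
      PySem.Dict.empty = l.foldl pvStepB PySem.Dict.empty := by
    rw [hl, List.foldl_map]; rfl
  rw [hA, hB]
  show (l.foldl pvStepA PySem.Dict.empty).items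
      = ((l.foldl pvStepB PySem.Dict.empty).items).map
          (fun q => (q.1, ((q.2.length : Int), q.2.foldl (· + ·) 0)))
  -- both dicts have the same keys, in the same order, with no duplicates
  have hkA : (l.foldl pvStepA PySem.Dict.empty).keys
      = PySem.Set.update (PySem.Dict.empty : PySem.Dict String (Int × Int)).keys (l.map (·.1)) :=
    PySem.Dict.keys_foldl_insert_key l (·.1)
      (fun d q => ((d.getD q.1 (0, 0)).1 + 1, (d.getD q.1 (0, 0)).2 + q.2)) _
  have hkB : (l.foldl pvStepB PySem.Dict.empty).keys
      = PySem.Set.update (PySem.Dict.empty : PySem.Dict String (List Int)).keys (l.map (·.1)) :=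
    PySem.Dict.keys_foldl_modify_key l (·.1) [] (fun _ q vs => vs ++ [q.2]) _
  have hndA : (l.foldl pvStepA PySem.Dict.empty).keys.Nodup :=
    PySem.Dict.nodup_keys_foldl_insert_key l (·.1) _ _ PySem.Dict.nodup_keys_empty
  have hndB : (l.foldl pvStepB PySem.Dict.empty).keys.Nodup :=
    PySem.Dict.nodup_keys_foldl_modify_key l (·.1) [] _ _ PySem.Dict.nodup_keys_empty
  rw [PySem.Dict.items_eq_map_keys _ hndA (0, 0), PySem.Dict.items_eq_map_keys _ hndB [],
      hkA, hkB]
  simp only [List.map_map]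
  refine List.map_congr_left (fun g _ => ?_)
  have h1 := pvGetD_foldA l PySem.Dict.empty g
  have h2 : (l.foldl pvStepB PySem.Dict.empty).getD g []
      = (l.filter (fun q => q.1 == g)).map (·.2) := by
    have := PySem.Dict.getD_foldl_modify_append l PySem.Dict.empty g
    simpa using this
  simp [Function.comp, h1, h2, List.sum_eq_foldl]
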